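-- pv_equiv track=rewrite | github.com/wasiqbarat/Unitime_API | app/json_to_xml_converter.py | format_days_string
-- ===== SOURCE A (Python) =====
-- def format_days_string(days_list):
--     """Convert a list of days to a binary string representation.
--
--     Example: ["Monday", "Wednesday", "Friday"] -> "1010100"
--     """
--     day_mapping = {
--         "monday": 0,
--         "tuesday": 1,
--         "wednesday": 2,
--         "thursday": 3,
--         "friday": 4,
--         "saturday": 5,
--         "sunday": 6
--     }
--
--     days_binary = ['0'] * 7
--     for day in days_list:
--         day_lower = day.lower()
--         if day_lower in day_mapping:
--             days_binary[day_mapping[day_lower]] = '1'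
--
--     return ''.join(days_binary)
-- ===== SOURCE B (Python) =====
-- def format_days_string(days_list):
--     """Convert a list of days to a binary string representation.
--
--     Example: ["Monday", "Wednesday", "Friday"] -> "1010100"
--     """
--     present = {day.lower() for day in days_list}
--     canonical = ("monday", "tuesday", "wednesday", "thursday",
--                  "friday", "saturday", "sunday")
--     return ''.join('1' if name in present else '0' for name in canonical)
-- ===== Notes on version B (the rewrite author's own statement) =====
-- stated objective: idiomatic
-- what changed: B inverts the traversal: instead of A's mutable 7-slot bit array indexed through a name->position dict while looping over the input, B builds a set of the lowercased input days once and then loops over the seven canonical day names in order, emitting '1'/'0' by membership.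
import Mathlib
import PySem

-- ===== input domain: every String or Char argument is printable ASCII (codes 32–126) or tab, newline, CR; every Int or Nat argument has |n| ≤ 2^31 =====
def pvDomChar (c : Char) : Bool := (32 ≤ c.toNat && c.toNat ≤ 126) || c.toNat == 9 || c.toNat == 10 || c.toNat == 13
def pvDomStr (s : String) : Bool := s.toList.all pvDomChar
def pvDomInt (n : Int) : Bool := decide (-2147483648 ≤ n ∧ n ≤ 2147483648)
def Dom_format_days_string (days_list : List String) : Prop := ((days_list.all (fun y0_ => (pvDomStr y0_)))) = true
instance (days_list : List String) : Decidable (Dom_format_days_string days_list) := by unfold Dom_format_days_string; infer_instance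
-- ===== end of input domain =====

-- B replaces A's mutable 7-slot bit array (indexed through a name->position dict while
-- looping over the input) by a single pass over the seven canonical day names, testing
-- membership in the set of lowercased input days; idiomatic, same cost.

-- ===== PORT A =====
def pvDayMap : PySem.Dict String Int :=
  PySem.Dict.mk
    [("monday", 0), ("tuesday", 1), ("wednesday", 2), ("thursday", 3),
     ("friday", 4), ("saturday", 5), ("sunday", 6)]

def pvStepA (acc : List String) (day : String) : List String :=
  let day_lower := PySem.Str.lower day
  match PySem.Dict.get? pvDayMap day_lower with
  | some i => acc.set i.toNat "1"   -- in-range assignment days_binary[i] = '1' (0 ≤ i ≤ 6)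
  | none => acc

def format_days_string (days_list : List String) : String :=
  PySem.Str.join "" (days_list.foldl pvStepA (List.replicate 7 "0"))

-- ===== PORT B =====
def pvCanonDays : List String :=
  ["monday", "tuesday", "wednesday", "thursday", "friday", "saturday", "sunday"]

def format_days_string_alt (days_list : List String) : String :=
  let present := PySem.Set.ofList (days_list.map PySem.Str.lower)
  PySem.Str.join ""
    (pvCanonDays.map (fun name => if PySem.Set.contains present name then "1" else "0"))

-- ===== PRECONDITION & SPEC =====
def Spec_format_days_string (days_list : List String) (out : String) : Prop := out = format_days_string_alt days_list
instance (days_list : List String) (out : String) : Decidable (Spec_format_days_string days_list out) := by unfold Spec_format_days_string; infer_instance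

-- ===== CLAIM (what is proved, stated in full; the proofs are below) =====
def Claim_equal_format_days_string : Prop := ∀ (days_list : List String), Dom_format_days_string days_list → Spec_format_days_string days_list (format_days_string days_list)

-- ===== LEMMAS AND PROOFS =====

/-- The 7-slot bit list as a function of which canonical days are marked. -/
def pvBits (p : String → Bool) : List String :=
  pvCanonDays.map (fun d => if p d then "1" else "0")

theorem pvStepA_bits (p : String → Bool) (x : String) :
    pvStepA (pvBits p) x = pvBits (fun d => p d || (d == PySem.Str.lower x)) := by
  unfold pvStepA
  by_cases h1 : PySem.Str.lower x = "monday"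
  · simp [h1, pvDayMap, PySem.Dict.get?, pvBits, pvCanonDays]
  by_cases h2 : PySem.Str.lower x = "tuesday"
  · simp [h2, pvDayMap, PySem.Dict.get?, pvBits, pvCanonDays]
  by_cases h3 : PySem.Str.lower x = "wednesday"
  · simp [h3, pvDayMap, PySem.Dict.get?, pvBits, pvCanonDays]
  by_cases h4 : PySem.Str.lower x = "thursday"
  · simp [h4, pvDayMap, PySem.Dict.get?, pvBits, pvCanonDays]
  by_cases h5 : PySem.Str.lower x = "friday"
  · simp [h5, pvDayMap, PySem.Dict.get?, pvBits, pvCanonDays]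
  by_cases h6 : PySem.Str.lower x = "saturday"
  · simp [h6, pvDayMap, PySem.Dict.get?, pvBits, pvCanonDays]
  by_cases h7 : PySem.Str.lower x = "sunday"
  · simp [h7, pvDayMap, PySem.Dict.get?, pvBits, pvCanonDays]
  · simp [pvDayMap, PySem.Dict.get?, pvBits, pvCanonDays,
      Ne.symm h1, Ne.symm h2, Ne.symm h3, Ne.symm h4, Ne.symm h5, Ne.symm h6, Ne.symm h7]

theorem pvFoldA_bits (xs : List String) (p : String → Bool) :
    xs.foldl pvStepA (pvBits p)
      = pvBits (fun d => p d || (xs.map PySem.Str.lower).contains d) := by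
  induction xs generalizing p with
  | nil => simp [pvBits]
  | cons x xs ih =>
      rw [List.foldl_cons, pvStepA_bits, ih]
      unfold pvBits
      refine List.map_congr_left (fun d _ => ?_)
      simp only [List.map_cons, List.contains_cons, Bool.or_assoc]

-- ===== VERDICT (by name: the statement is the Claim_ definition above) =====
theorem format_days_string_spec : Claim_equal_format_days_string := by
  intro days_list _
  show format_days_string days_list = format_days_string_alt days_list
  unfold format_days_string format_days_string_alt
  have h0 : (List.replicate 7 "0" : List String) = pvBits (fun _ => false) := by
    rfl
  rw [h0, pvFoldA_bits]
  unfold pvBits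
  congr 1
  refine List.map_congr_left (fun d _ => ?_)
  have hc : PySem.Set.contains (PySem.Set.ofList (days_list.map PySem.Str.lower)) d
      = (days_list.map PySem.Str.lower).contains d := by
    by_cases h : d ∈ days_list.map PySem.Str.lower <;>
      simp [PySem.Set.mem_ofList, h]
  rw [hc]
  simp
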